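-- pv_equiv track=rewrite | github.com/NiharikaSahu2309/EquityResearchAIBOT | agentic_rag.py | _identify_pattern
-- ===== SOURCE A (Python) =====
-- from typing import List, Dict, Any, Optional, Tuple
--
-- def _identify_pattern(data: List) -> str:
--     """Identify patterns in data"""
--     # Simplified pattern identification
--     if len(data) < 3:
--         return 'insufficient_data'
--
--     # Check for consistent growth
--     if all(data[i] <= data[i+1] for i in range(len(data)-1)):
--         return 'consistent_growth'
--     elif all(data[i] >= data[i+1] for i in range(len(data)-1)):
--         return 'consistent_decline'
--     else:
--         return 'volatile'
-- ===== SOURCE B (Python) =====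
-- def _identify_pattern(data) -> str:
--     """Identify patterns in data"""
--     if len(data) < 3:
--         return 'insufficient_data'
--     if data == sorted(data):
--         return 'consistent_growth'
--     if data == sorted(data, reverse=True):
--         return 'consistent_decline'
--     return 'volatile'
-- ===== Notes on version B (the rewrite author's own statement) =====
-- stated objective: idiomatic
-- what changed: Replaces the two index-based pairwise all-scans with a sort-then-compare: data is monotone iff it equals its (stable) sorted copy.
import Mathlib
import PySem

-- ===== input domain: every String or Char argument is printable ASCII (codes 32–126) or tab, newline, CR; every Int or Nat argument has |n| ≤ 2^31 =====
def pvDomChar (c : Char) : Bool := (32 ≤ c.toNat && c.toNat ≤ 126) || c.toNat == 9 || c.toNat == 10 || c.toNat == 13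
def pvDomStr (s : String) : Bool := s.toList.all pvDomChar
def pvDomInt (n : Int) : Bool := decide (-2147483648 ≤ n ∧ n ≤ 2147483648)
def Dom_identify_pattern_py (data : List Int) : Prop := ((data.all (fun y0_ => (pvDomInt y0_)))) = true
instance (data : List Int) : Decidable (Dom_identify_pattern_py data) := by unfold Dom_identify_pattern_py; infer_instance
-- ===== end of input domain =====

-- B replaces A's two index-based pairwise all-scans by the idiomatic sort-then-compare
-- (data is monotone iff it equals its stable sorted copy); equal return value, not faster.


-- ===== PORT A =====
-- all(data[i] <= data[i+1] for i in range(len(data)-1)); every index i, i+1 is in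
-- range for i ∈ range(len(data)-1), so the pyGetD default 0 is never consulted.
def identify_pattern_py (data : List Int) : String :=
  if data.length < 3 then "insufficient_data"
  else if (PySem.List.pyRange 0 ((data.length : Int) - 1)).all
      (fun i => decide (PySem.List.pyGetD data i 0 ≤ PySem.List.pyGetD data (i + 1) 0)) then
    "consistent_growth"
  else if (PySem.List.pyRange 0 ((data.length : Int) - 1)).all
      (fun i => decide (PySem.List.pyGetD data i 0 ≥ PySem.List.pyGetD data (i + 1) 0)) then
    "consistent_decline"
  else "volatile"

-- ===== PORT B =====
def identify_pattern_py_alt (data : List Int) : String :=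
  if data.length < 3 then "insufficient_data"
  else if data = PySem.List.sorted data (fun x => x) then "consistent_growth"
  else if data = PySem.List.sorted data (fun x => x) true then "consistent_decline"
  else "volatile"

-- ===== PRECONDITION & SPEC =====
def Spec_identify_pattern_py (data : List Int) (out : String) : Prop := out = identify_pattern_py_alt data
instance (data : List Int) (out : String) : Decidable (Spec_identify_pattern_py data out) := by unfold Spec_identify_pattern_py; infer_instance

-- ===== CLAIM (what is proved, stated in full; the proofs are below) =====
def Claim_equal_identify_pattern_py : Prop := ∀ (data : List Int), Dom_identify_pattern_py data → Spec_identify_pattern_py data (identify_pattern_py data)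

-- ===== LEMMAS AND PROOFS =====

-- A's generator-scan over range(len(data)-1) says exactly that adjacent elements are R-related.
theorem pv_all_adjacent (data : List Int) (R : Int → Int → Prop) [DecidableRel R] :
    ((PySem.List.pyRange 0 ((data.length : Int) - 1)).all
      (fun i => decide (R (PySem.List.pyGetD data i 0) (PySem.List.pyGetD data (i + 1) 0))) = true)
    ↔ List.IsChain R data := by
  rw [List.isChain_iff_getElem, List.all_eq_true]
  constructor
  · intro h i hi
    have hmem : (i : Int) ∈ PySem.List.pyRange 0 ((data.length : Int) - 1) := by
      rw [PySem.List.mem_pyRange_one]; omega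
    have := h _ hmem
    rw [PySem.List.pyGetD_eq_getElem data 0 (by omega) (by exact_mod_cast Nat.lt_of_succ_lt hi),
        PySem.List.pyGetD_eq_getElem data 0 (by omega) (by omega)] at this
    simpa using this
  · intro h i hmem
    rw [PySem.List.mem_pyRange_one] at hmem
    have hi1 : i.toNat + 1 < data.length := by omega
    rw [PySem.List.pyGetD_eq_getElem data 0 (by omega) (by omega),
        PySem.List.pyGetD_eq_getElem data 0 (by omega) (by omega)]
    have heq : (i + 1).toNat = i.toNat + 1 := by omega
    simp only [decide_eq_true_eq, heq]
    exact h i.toNat hi1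

-- A list equals its stable sorted copy exactly when it is already pairwise ordered.
theorem pv_eq_sorted_iff (data : List Int) :
    data = PySem.List.sorted data (fun x => x) ↔ List.Pairwise (· ≤ ·) data := by
  constructor
  · intro h
    have := PySem.List.sorted_pairwise data (fun x => x)
    rw [← h] at this; exact this
  · intro h; exact (PySem.List.sorted_eq_self_of_pairwise data (fun x => x) h).symm

theorem pv_eq_sorted_rev_iff (data : List Int) :
    data = PySem.List.sorted data (fun x => x) true ↔ List.Pairwise (fun a b : Int => b ≤ a) data := by
  constructor
  · intro h
    have := PySem.List.sorted_pairwise_rev data (fun x => x)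
    rw [← h] at this; exact this
  · intro h; exact (PySem.List.sorted_rev_eq_self_of_pairwise data (fun x => x) h).symm

-- ===== VERDICT (by name: the statement is the Claim_ definition above) =====
theorem identify_pattern_py_spec : Claim_equal_identify_pattern_py := by
  intro data _
  unfold Spec_identify_pattern_py identify_pattern_py identify_pattern_py_alt
  by_cases hlen : data.length < 3
  · simp [hlen]
  · simp only [hlen, if_false]
    have hg : ((PySem.List.pyRange 0 ((data.length : Int) - 1)).all
        (fun i => decide (PySem.List.pyGetD data i 0 ≤ PySem.List.pyGetD data (i + 1) 0)) = true)
        ↔ data = PySem.List.sorted data (fun x => x) := by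
      rw [pv_all_adjacent data (· ≤ ·), List.isChain_iff_pairwise, pv_eq_sorted_iff]
    have hd : ((PySem.List.pyRange 0 ((data.length : Int) - 1)).all
        (fun i => decide (PySem.List.pyGetD data i 0 ≥ PySem.List.pyGetD data (i + 1) 0)) = true)
        ↔ data = PySem.List.sorted data (fun x => x) true := by
      rw [pv_all_adjacent data (· ≥ ·), pv_eq_sorted_rev_iff]
      exact List.isChain_iff_pairwise
    by_cases h1 : data = PySem.List.sorted data (fun x => x)
    · rw [if_pos (hg.mpr h1), if_pos h1]
    · rw [if_neg (fun hh => h1 (hg.mp hh)), if_neg h1]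
      by_cases h2 : data = PySem.List.sorted data (fun x => x) true
      · rw [if_pos (hd.mpr h2), if_pos h2]
      · rw [if_neg (fun hh => h2 (hd.mp hh)), if_neg h2]
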